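-- pv_equiv track=rewrite | github.com/nhatxart/RoboticsandAI---Fall-2024 | MazeSkeletonizationandAStar-NoSerial-LessAggressive.py | _generate_instructions
-- ===== SOURCE A (Python) =====
-- def _generate_instructions(path):
--     """
--     Generate navigation instructions based on grid path
--
--     Args:
--     path (list): List of grid coordinates
--
--     Returns:
--     list: Navigation instructions
--     """
--     instructions = []
--
--     for i in range(1, len(path) - 1):
--         prev = path[i-1]
--         curr = path[i]
--         next = path[i+1]
--
--         # Calculate movement vectors
--         prev_move = (curr[0] - prev[0], curr[1] - prev[1])
--         next_move = (next[0] - curr[0], next[1] - curr[1])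
--
--         # Determine turn direction using cross product
--         cross_product = prev_move[0] * next_move[1] - prev_move[1] * next_move[0]
--
--         # Determine instruction
--         if cross_product > 0:
--             turn = "turn right"
--         elif cross_product < 0:
--             turn = "turn left"
--         else:
--             turn = "go forward"
--
--         instructions.append(f"Grid Point {curr}: {turn}")
--
--     return instructions
-- ===== SOURCE B (Python) =====
-- def _generate_instructions(path):
--     # Backwards consumption: copy the path, repeatedly pop the last point and
--     # classify the now-last interior point against its neighbours, collecting
--     # instructions in reverse; a sign table replaces the if/elif chain.
--     TURNS = {1: "turn right", -1: "turn left", 0: "go forward"}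
--     out = []
--     work = list(path)
--     while len(work) >= 3:
--         r = work.pop()
--         q = work[-1]
--         p = work[-2]
--         cross = (q[0] - p[0]) * (r[1] - q[1]) - (q[1] - p[1]) * (r[0] - q[0])
--         sign = (cross > 0) - (cross < 0)
--         out.append(f"Grid Point {q}: {TURNS[sign]}")
--     out.reverse()
--     return out
-- ===== Notes on version B (the rewrite author's own statement) =====
-- stated objective: alternative
-- what changed: Replaces A's forward index scan with if/elif classification by a backwards consumption of a working copy (pop the last point each step, emit instructions in reverse, reverse at the end) and a sign-to-instruction dictionary instead of the branch chain.
import Mathlib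
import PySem

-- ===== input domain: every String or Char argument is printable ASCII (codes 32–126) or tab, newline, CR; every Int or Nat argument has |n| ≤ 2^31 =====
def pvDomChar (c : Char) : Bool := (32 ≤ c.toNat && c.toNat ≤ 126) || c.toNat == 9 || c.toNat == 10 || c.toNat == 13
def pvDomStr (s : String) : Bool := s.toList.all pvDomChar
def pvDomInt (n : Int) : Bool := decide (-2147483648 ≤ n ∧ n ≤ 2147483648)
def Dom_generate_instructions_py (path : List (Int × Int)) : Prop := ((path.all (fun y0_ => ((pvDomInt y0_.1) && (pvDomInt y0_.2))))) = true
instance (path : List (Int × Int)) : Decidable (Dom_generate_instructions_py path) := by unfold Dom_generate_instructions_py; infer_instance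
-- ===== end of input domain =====

-- B consumes a working copy of the path from the back (pop the last point each step,
-- emit in reverse, reverse at the end) and classifies via a sign table; objective: alternative.

-- f"Grid Point {curr}: {turn}" (Python tuple repr "(x, y)"); shared by both ports
def pvFmt (curr : Int × Int) (turn : String) : String :=
  "Grid Point (" ++ PySem.Int.toStr curr.1 ++ ", " ++ PySem.Int.toStr curr.2 ++ "): " ++ turn

-- ===== PORT A =====
def generate_instructions_py (path : List (Int × Int)) : List String :=
  (PySem.List.pyRange 1 ((path.length : Int) - 1) 1).foldl (fun instructions i =>
    let prev := PySem.List.pyGetD path (i - 1) (0, 0)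
    let curr := PySem.List.pyGetD path i (0, 0)
    let next := PySem.List.pyGetD path (i + 1) (0, 0)
    let prev_move := (curr.1 - prev.1, curr.2 - prev.2)
    let next_move := (next.1 - curr.1, next.2 - curr.2)
    let cross_product := prev_move.1 * next_move.2 - prev_move.2 * next_move.1
    let turn := if cross_product > 0 then "turn right"
                else if cross_product < 0 then "turn left"
                else "go forward"
    instructions ++ [pvFmt curr turn]) []

-- ===== PORT B =====
-- TURNS = {1: "turn right", -1: "turn left", 0: "go forward"}
def altTurns : PySem.Dict Int String :=
  PySem.Dict.ofList [(1, "turn right"), (-1, "turn left"), (0, "go forward")]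

-- one loop body: r = work.pop(); q = work[-1]; p = work[-2]; out.append(...)
-- (TURNS[sign] ported as getD with default ""; sign is always one of the three keys)
def altStep (p q r : Int × Int) : String :=
  let cross := (q.1 - p.1) * (r.2 - q.2) - (q.2 - p.2) * (r.1 - q.1)
  let sign : Int := (if cross > 0 then 1 else 0) - (if cross < 0 then 1 else 0)
  pvFmt q (PySem.Dict.getD altTurns sign "")

-- the while loop over the working copy, viewed from the back: the loop runs while
-- len(work) >= 3, pops the last element r and reads the two before it, so it is
-- recursion on the REVERSED working list (head of the reversed list = work[-1])
def altLoop : List (Int × Int) → List String → List String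
  | r :: q :: p :: rest, out => altLoop (q :: p :: rest) (out ++ [altStep p q r])
  | _, out => out

def generate_instructions_py_alt (path : List (Int × Int)) : List String :=
  (altLoop path.reverse []).reverse

-- ===== PRECONDITION & SPEC =====
def Spec_generate_instructions_py (path : List (Int × Int)) (out : List String) : Prop := out = generate_instructions_py_alt path
instance (path : List (Int × Int)) (out : List String) : Decidable (Spec_generate_instructions_py path out) := by unfold Spec_generate_instructions_py; infer_instance

-- ===== CLAIM (what is proved, stated in full; the proofs are below) =====
def Claim_equal_generate_instructions_py : Prop := ∀ (path : List (Int × Int)), Dom_generate_instructions_py path → Spec_generate_instructions_py path (generate_instructions_py path)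

-- ===== LEMMAS AND PROOFS =====

-- one instruction for the interior point q between p and r
def pvStep (p q r : Int × Int) : String :=
  let cross := (q.1 - p.1) * (r.2 - q.2) - (q.2 - p.2) * (r.1 - q.1)
  pvFmt q (if cross > 0 then "turn right" else if cross < 0 then "turn left" else "go forward")

-- common structural characterisation of both ports
def pvChain : List (Int × Int) → List String
  | p :: q :: r :: rest => pvStep p q r :: pvChain (q :: r :: rest)
  | _ => []

lemma altStep_eq (p q r : Int × Int) : altStep p q r = pvStep p q r := by
  unfold altStep pvStep
  by_cases h1 : (q.1 - p.1) * (r.2 - q.2) - (q.2 - p.2) * (r.1 - q.1) > 0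
  · simp only [if_pos h1, if_neg (not_lt.mpr (le_of_lt h1))]
    rfl
  · by_cases h2 : (q.1 - p.1) * (r.2 - q.2) - (q.2 - p.2) * (r.1 - q.1) < 0
    · simp only [if_neg h1, if_pos h2]
      rfl
    · simp only [if_neg h1, if_neg h2]
      rfl

-- appending one point to a path of length ≥ 2 appends one instruction
lemma pvChain_snoc : ∀ (ys : List (Int × Int)) (a b r : Int × Int),
    pvChain (ys ++ [a, b, r]) = pvChain (ys ++ [a, b]) ++ [pvStep a b r]
  | [], _, _, _ => rfl
  | [_], _, _, _ => rfl
  | [_, _], _, _, _ => rfl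
  | x :: y :: z :: ys, a, b, r => by
    have ih := pvChain_snoc (y :: z :: ys) a b r
    simp only [List.cons_append, pvChain] at ih ⊢
    rw [ih]

lemma altLoop_eq : ∀ (l : List (Int × Int)) (out : List String),
    altLoop l out = out ++ (pvChain l.reverse).reverse
  | [], out => by simp [altLoop, pvChain]
  | [_], out => by simp [altLoop, pvChain]
  | [_, _], out => by simp [altLoop, pvChain]
  | r :: q :: p :: rest, out => by
    rw [show altLoop (r :: q :: p :: rest) out = altLoop (q :: p :: rest) (out ++ [altStep p q r]) from rfl,
      altLoop_eq (q :: p :: rest)]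
    have h1 : (r :: q :: p :: rest).reverse = rest.reverse ++ [p, q, r] := by simp
    have h2 : (q :: p :: rest).reverse = rest.reverse ++ [p, q] := by simp
    rw [h1, h2, pvChain_snoc, altStep_eq]
    simp

lemma alt_eq_chain (path : List (Int × Int)) :
    generate_instructions_py_alt path = pvChain path := by
  unfold generate_instructions_py_alt
  rw [altLoop_eq]
  simp

lemma a_step_eq (path : List (Int × Int)) (k : Nat) :
    pvStep (path.getD k (0, 0)) (path.getD (k + 1) (0, 0)) (path.getD (k + 2) (0, 0)) =
    pvStep (PySem.List.pyGetD path (1 + (k : Int) - 1) (0, 0))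
           (PySem.List.pyGetD path (1 + (k : Int)) (0, 0))
           (PySem.List.pyGetD path (1 + (k : Int) + 1) (0, 0)) := by
  have h0 : 1 + (k : Int) - 1 = ((k : Nat) : Int) := by omega
  have h2 : 1 + (k : Int) + 1 = ((k + 2 : Nat) : Int) := by omega
  have h1 : 1 + (k : Int) = ((k + 1 : Nat) : Int) := by omega
  rw [h0, h2, h1, PySem.List.pyGetD_natCast, PySem.List.pyGetD_natCast, PySem.List.pyGetD_natCast]

lemma range_map_eq_chain : ∀ path : List (Int × Int),
    (List.range (path.length - 2)).map
      (fun k => pvStep (path.getD k (0, 0)) (path.getD (k + 1) (0, 0)) (path.getD (k + 2) (0, 0)))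
      = pvChain path
  | [] => rfl
  | [_] => rfl
  | [_, _] => rfl
  | p :: q :: r :: rest => by
    have ih := range_map_eq_chain (q :: r :: rest)
    have hlen : (p :: q :: r :: rest).length - 2 = rest.length + 1 := by simp
    rw [hlen, List.range_succ_eq_map, List.map_cons, List.map_map, pvChain]
    refine congrArg₂ _ rfl ?_
    have hlen2 : (q :: r :: rest).length - 2 = rest.length := by simp
    rw [← ih, hlen2]
    apply List.map_congr_left
    intro k _
    rfl

lemma a_eq_chain (path : List (Int × Int)) :
    generate_instructions_py path = pvChain path := by
  unfold generate_instructions_py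
  rw [PySem.List.foldl_append_singleton_eq_map, List.nil_append, PySem.List.pyRange_one,
    List.map_map]
  have hlen : ((path.length : Int) - 1 - 1).toNat = path.length - 2 := by omega
  rw [hlen, ← range_map_eq_chain path]
  apply List.map_congr_left
  intro k _
  exact (a_step_eq path k).symm

-- ===== VERDICT (by name: the statement is the Claim_ definition above) =====
theorem generate_instructions_py_spec : Claim_equal_generate_instructions_py := by
  intro path _
  unfold Spec_generate_instructions_py
  rw [a_eq_chain, alt_eq_chain]
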